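-- pv_equiv track=rewrite | github.com/feymanpaper/AppUIAutomator2Navigation | StateChecker.py | check_screen_list_by_pattern_order
-- ===== SOURCE A (Python) =====
-- def check_screen_list_by_pattern_order(k, screen_list, step) -> bool:
--     l = 0
--     for i in range(step):
--         l += 1
--     for cnt in range(0, k - 1, 1):
--         for i in range(step):
--             if l >= len(screen_list):
--                 return False
--             elif screen_list[l] != screen_list[i]:
--                 return False
--             else:
--                 l += 1
--     return True
-- ===== SOURCE B (Python) =====
-- def check_screen_list_by_pattern_order(k, screen_list, step) -> bool:
--     if step <= 0 or k <= 1: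
--         return True
--     pattern = screen_list[:step]
--     for m in range(1, k):
--         block = screen_list[m * step:(m + 1) * step]
--         if len(block) < step or block != pattern:
--             return False
--     return True
-- ===== Notes on version B (the rewrite author's own statement) =====
-- stated objective: simpler
-- what changed: Replaces A's single advancing pointer with nested counted loops and element-by-element comparison by guarding the trivial cases (step<=0 or k<=1) and comparing whole slices: each block screen_list[m*step:(m+1)*step] is checked against the pattern screen_list[:step] with one slice equality per block (bulk slice comparison instead of per-element indexed loops).
import Mathlib
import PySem

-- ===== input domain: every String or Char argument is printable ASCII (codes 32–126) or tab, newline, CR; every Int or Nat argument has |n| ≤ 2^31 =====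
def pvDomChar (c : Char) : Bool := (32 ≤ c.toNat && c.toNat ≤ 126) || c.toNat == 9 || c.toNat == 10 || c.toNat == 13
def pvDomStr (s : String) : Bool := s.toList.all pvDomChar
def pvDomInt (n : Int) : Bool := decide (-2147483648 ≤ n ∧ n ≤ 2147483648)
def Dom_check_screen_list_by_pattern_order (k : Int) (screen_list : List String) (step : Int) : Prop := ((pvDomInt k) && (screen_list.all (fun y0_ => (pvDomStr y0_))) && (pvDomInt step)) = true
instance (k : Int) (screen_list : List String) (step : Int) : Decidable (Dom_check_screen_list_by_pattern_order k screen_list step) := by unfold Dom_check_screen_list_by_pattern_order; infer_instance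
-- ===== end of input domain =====

-- B replaces A's advancing pointer with modular comparisons by whole-slice block comparison against the pattern (objective: simpler).


-- ===== PORT A =====
-- inner 'for i in range(step)' loop with early return: none = 'return False', some l = updated pointer
def pvInnerA (sl : List String) : List Int → Int → Option Int
  | [], l => some l
  | i :: is, l =>
      if (sl.length : Int) ≤ l then none
      else if PySem.List.pyGet? sl l ≠ PySem.List.pyGet? sl i then none
      else pvInnerA sl is (l + 1)

-- outer 'for cnt in range(0, k - 1, 1)' loop
def pvOuterA (sl : List String) (step : Int) : List Int → Int → Bool
  | [], _ => true
  | _ :: cs, l =>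
      match pvInnerA sl (PySem.List.pyRange 0 step 1) l with
      | none => false
      | some l' => pvOuterA sl step cs l'

def check_screen_list_by_pattern_order (k : Int) (screen_list : List String) (step : Int) : Bool :=
  let l := (PySem.List.pyRange 0 step 1).foldl (fun l _ => l + 1) 0
  pvOuterA screen_list step (PySem.List.pyRange 0 (k - 1) 1) l

-- ===== PORT B =====
-- 'for m in range(1, k)' block loop of Source B
def pvBlocksB (sl : List String) (step : Int) (pattern : List String) : List Int → Bool
  | [] => true
  | m :: ms =>
      let block := PySem.List.slice sl (some (m * step)) (some ((m + 1) * step))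
      if (block.length : Int) < step ∨ block ≠ pattern then false
      else pvBlocksB sl step pattern ms

def check_screen_list_by_pattern_order_alt (k : Int) (screen_list : List String) (step : Int) : Bool :=
  if step ≤ 0 ∨ k ≤ 1 then true
  else
    let pattern := PySem.List.slice screen_list none (some step)
    pvBlocksB screen_list step pattern (PySem.List.pyRange 1 k 1)

-- ===== PRECONDITION & SPEC =====
def Spec_check_screen_list_by_pattern_order (k : Int) (screen_list : List String) (step : Int) (out : Bool) : Prop := out = check_screen_list_by_pattern_order_alt k screen_list step
instance (k : Int) (screen_list : List String) (step : Int) (out : Bool) : Decidable (Spec_check_screen_list_by_pattern_order k screen_list step out) := by unfold Spec_check_screen_list_by_pattern_order; infer_instance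

-- ===== CLAIM (what is proved, stated in full; the proofs are below) =====
def Claim_equal_check_screen_list_by_pattern_order : Prop := ∀ (k : Int) (screen_list : List String) (step : Int), Dom_check_screen_list_by_pattern_order k screen_list step → Spec_check_screen_list_by_pattern_order k screen_list step (check_screen_list_by_pattern_order k screen_list step)

-- ===== LEMMAS AND PROOFS =====

lemma pv_foldl_count (L : List Int) (init : Int) :
    L.foldl (fun l _ => l + 1) init = init + L.length := by
  induction L generalizing init with
  | nil => simp
  | cons x xs ih => simp [List.foldl, ih]; ring

lemma pv_outerA_trivial (sl : List String) (step : Int) (hs : step ≤ 0) :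
    ∀ (cs : List Int) (l : Int), pvOuterA sl step cs l = true := by
  intro cs
  induction cs with
  | nil => intro l; rfl
  | cons c cs ih =>
      intro l
      simp only [pvOuterA, PySem.List.pyRange_one_eq_nil hs, pvInnerA]
      exact ih l

lemma pv_innerA_spec (sl : List String) :
    ∀ (c : Nat) (a b l : Int), 0 ≤ a → a ≤ b → b ≤ l → (b - a).toNat = c →
    pvInnerA sl (PySem.List.pyRange a b 1) l =
      if (a < b → l + (b - a) ≤ (sl.length : Int)) ∧
         (sl.drop l.toNat).take (b - a).toNat = (sl.drop a.toNat).take (b - a).toNat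
      then some (l + (b - a)) else none := by
  intro c
  induction c with
  | zero =>
      intro a b l ha hab hbl hc
      have hba : a = b := by omega
      subst hba
      simp [PySem.List.pyRange_one_eq_nil (le_refl a), pvInnerA]
  | succ c ih =>
      intro a b l ha hab hbl hc
      have hlt : a < b := by omega
      have hl0 : 0 ≤ l := by omega
      rw [PySem.List.pyRange_one_cons hlt]
      simp only [pvInnerA]
      by_cases hn : (sl.length : Int) ≤ l
      · rw [if_pos hn]
        have : ¬ ((a < b → l + (b - a) ≤ (sl.length : Int)) ∧
            (sl.drop l.toNat).take (b - a).toNat = (sl.drop a.toNat).take (b - a).toNat) := by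
          intro ⟨h1, _⟩; have := h1 hlt; omega
        rw [if_neg this]
      · rw [if_neg hn]
        rw [not_le] at hn
        have hln : l.toNat < sl.length := by omega
        have han : a.toNat < sl.length := by omega
        have hga : PySem.List.pyGet? sl a = some sl[a.toNat] :=
          PySem.List.pyGet?_eq_some_getElem sl ha (by omega)
        have hgl : PySem.List.pyGet? sl l = some sl[l.toNat] :=
          PySem.List.pyGet?_eq_some_getElem sl hl0 (by omega)
        have hdl : sl.drop l.toNat = sl[l.toNat] :: sl.drop (l.toNat + 1) :=
          List.drop_eq_getElem_cons hln
        have hda : sl.drop a.toNat = sl[a.toNat] :: sl.drop (a.toNat + 1) :=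
          List.drop_eq_getElem_cons han
        have hcnt : (b - a).toNat = c + 1 := hc
        by_cases heq : sl[l.toNat] = sl[a.toNat]
        · rw [if_neg (by simp [hga, hgl, heq])]
          rw [ih (a + 1) b (l + 1) (by omega) (by omega) (by omega) (by omega)]
          have e1 : (l + 1).toNat = l.toNat + 1 := by omega
          have e2 : (a + 1).toNat = a.toNat + 1 := by omega
          have e3 : (b - (a + 1)).toNat = c := by omega
          have cong : ((a + 1 < b → l + 1 + (b - (a + 1)) ≤ (sl.length : Int)) ∧
              (sl.drop (l + 1).toNat).take (b - (a + 1)).toNat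
                = (sl.drop (a + 1).toNat).take (b - (a + 1)).toNat) ↔
              ((a < b → l + (b - a) ≤ (sl.length : Int)) ∧
              (sl.drop l.toNat).take (b - a).toNat = (sl.drop a.toNat).take (b - a).toNat) := by
            rw [e1, e2, e3, hcnt, hdl, hda]
            simp only [List.take_succ_cons, List.cons.injEq]
            constructor
            · rintro ⟨h1, h2⟩
              refine ⟨fun _ => ?_, heq, h2⟩
              by_cases hb : a + 1 < b
              · have := h1 hb; omega
              · have : b = a + 1 := by omega
                omega
            · rintro ⟨h1, _, h3⟩
              exact ⟨fun hb => by have := h1 hlt; omega, h3⟩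
          by_cases hcond : (a < b → l + (b - a) ≤ (sl.length : Int)) ∧
              (sl.drop l.toNat).take (b - a).toNat = (sl.drop a.toNat).take (b - a).toNat
          · rw [if_pos (cong.mpr hcond), if_pos hcond]
            congr 1; omega
          · rw [if_neg (fun h => hcond (cong.mp h)), if_neg hcond]
        · rw [if_pos (by simp [hga, hgl, heq])]
          have : ¬ ((a < b → l + (b - a) ≤ (sl.length : Int)) ∧
              (sl.drop l.toNat).take (b - a).toNat = (sl.drop a.toNat).take (b - a).toNat) := by
            rintro ⟨_, h2⟩
            rw [hdl, hda, hcnt] at h2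
            simp only [List.take_succ_cons, List.cons.injEq] at h2
            exact heq h2.1
          rw [if_neg this]

lemma pv_outer_eq_blocks (sl : List String) (step : Int) (hstep : 0 < step) :
    ∀ (c : Nat) (cs : List Int) (m : Int), cs.length = c → 1 ≤ m →
    pvOuterA sl step cs (m * step) =
      pvBlocksB sl step (sl.take step.toNat) (PySem.List.pyRange m (m + c) 1) := by
  intro c
  induction c with
  | zero =>
      intro cs m hlen _
      cases cs with
      | nil =>
          simp [pvOuterA, pvBlocksB]
      | cons x cs' => simp at hlen
  | succ c ih =>
      intro cs m hlen hm
      cases cs with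
      | nil => simp at hlen
      | cons x cs' =>
      have hlen' : cs'.length = c := by simpa using hlen
      have hmk : m < m + (((c:Nat) : Int) + 1) := by omega
      rw [show ((m : Int) + ((c + 1 : Nat) : Int)) = m + (((c:Nat) : Int) + 1) by push_cast; ring,
          PySem.List.pyRange_one_cons hmk]
      simp only [pvOuterA, pvBlocksB]
      have h0l : (0:Int) ≤ m * step := by positivity
      have hbl : step ≤ m * step := le_mul_of_one_le_left (le_of_lt hstep) hm
      rw [pv_innerA_spec sl step.toNat 0 step (m * step) (le_refl 0) (le_of_lt hstep) hbl (by omega)]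
      simp only [Int.toNat_zero, List.drop_zero, sub_zero]
      have hblock : PySem.List.slice sl (some (m * step)) (some ((m + 1) * step)) =
          (sl.drop (m * step).toNat).take step.toNat := by
        rw [PySem.List.slice_toNat sl h0l (by positivity)]
        congr 1
        have : (m + 1) * step = m * step + step := by ring
        omega
      rw [hblock]
      have hms : ((m * step).toNat : Int) = m * step := Int.toNat_of_nonneg h0l
      by_cases hb : m * step + step ≤ (sl.length : Int)
      · by_cases he : (sl.drop (m * step).toNat).take step.toNat = sl.take step.toNat
        · have hno : ¬ (((((sl.drop (m * step).toNat).take step.toNat).length : Nat) : Int) < step ∨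
              (sl.drop (m * step).toNat).take step.toNat ≠ sl.take step.toNat) := by
            exact not_or.mpr ⟨not_lt.mpr (by simp only [List.length_take, List.length_drop]; omega),
              not_not_intro he⟩
          rw [if_pos ⟨fun _ => hb, he⟩, if_neg hno]
          show pvOuterA sl step cs' (m * step + step) = _
          rw [show m * step + step = (m + 1) * step by ring,
              show m + (((c:Nat) : Int) + 1) = (m + 1) + ((c:Nat) : Int) by ring]
          exact ih cs' (m + 1) hlen' (by omega)
        · rw [if_neg (fun h => he h.2), if_pos (Or.inr he)]
      · rw [if_neg (fun h => hb (h.1 hstep)), if_pos (Or.inl (by simp only [List.length_take, List.length_drop]; omega))]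

-- ===== VERDICT (by name: the statement is the Claim_ definition above) =====
theorem check_screen_list_by_pattern_order_spec : Claim_equal_check_screen_list_by_pattern_order := by
  intro k sl step _
  unfold Spec_check_screen_list_by_pattern_order
  unfold check_screen_list_by_pattern_order check_screen_list_by_pattern_order_alt
  by_cases hs : step ≤ 0
  · rw [if_pos (Or.inl hs)]
    simpa using pv_outerA_trivial sl step hs _ _
  · rw [not_le] at hs
    by_cases hk : k ≤ 1
    · rw [if_pos (Or.inr hk)]
      rw [PySem.List.pyRange_one_eq_nil (by omega : k - 1 ≤ 0)]
      rfl
    · rw [if_neg (by omega)]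
      rw [not_le] at hk
      have hl0 : (PySem.List.pyRange 0 step 1).foldl (fun l _ => l + 1) (0:Int) = step := by
        rw [pv_foldl_count, PySem.List.length_pyRange_one]
        omega
      simp only [hl0]
      have hlen : (PySem.List.pyRange 0 (k - 1) 1).length = (k - 1).toNat := by
        rw [PySem.List.length_pyRange_one]; congr 1; omega
      have := pv_outer_eq_blocks sl step hs (k - 1).toNat (PySem.List.pyRange 0 (k - 1) 1) 1 hlen (le_refl 1)
      rw [one_mul] at this
      rw [show ((1:Int) + ((k - 1).toNat : Int)) = k by omega] at this
      rw [this]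
      rw [PySem.List.slice_to sl (by omega : (0:Int) ≤ step)]
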